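-- pv_equiv track=rewrite | github.com/DamonGeelen/Connect-Four-AI | my_ai.py | up_right_streak_check
-- ===== SOURCE A (Python) =====
-- def up_right_streak_check(board, symbol):
--     # Keep track of streak
--     up_right_streak = 0
--
--     # Keep track of checked spaces
--     checked = []
--
--     # Check for streaks moving upward and to the right
--     for col in range(len(board) - 3):
--         for row in range(len(board[0]) - 1, 2, -1):
--
--             # Skip checked spaces
--             if [col, row] in checked:
--                 continue
--
--             else:
--                 if board[col][row] == symbol:
--                     i = 1
--                     while col + i < 7 and row - i >= 0 and board[col + i][row - i] == symbol:
--                         checked.append([col + i, row - i])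
--                         i += 1
--
--                     # Only count streak if it is not blocked
--                     if col + i < 7 and row - i >= 0 and board[col + i][row - i] == ' ':
--                         up_right_streak += i - 1
--
--     return up_right_streak
-- ===== SOURCE B (Python) =====
-- def up_right_streak_check(board, symbol):
--     # Stateless rewrite: no `checked` list. A cell starts a maximal up-right
--     # diagonal run exactly when its down-left neighbour is not the symbol, so a
--     # constant-time predecessor test replaces A's checked-list bookkeeping.
--     total = 0
--     if not board:
--         return 0
--     rows = len(board[0])
--     for c in range(len(board) - 3):
--         for r in range(3, rows):
--             if board[c][r] != symbol:
--                 continue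
--             if c >= 1 and r + 1 < rows and board[c - 1][r + 1] == symbol:
--                 continue  # interior cell of a run: counted at the run's first cell
--             i = 1
--             while c + i < 7 and r - i >= 0 and board[c + i][r - i] == symbol:
--                 i += 1
--             if c + i < 7 and r - i >= 0 and board[c + i][r - i] == ' ':
--                 total += i - 1
--     return total
-- ===== Notes on version B (the rewrite author's own statement) =====
-- stated objective: simpler
-- what changed: Drops A's `checked` list entirely: instead of marking walked cells and scanning the list before every cell, B decides each cell locally with a constant-time run-start test (the down-left neighbour is not the symbol), so no deduplication state is threaded through the loops.
import Mathlib
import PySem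

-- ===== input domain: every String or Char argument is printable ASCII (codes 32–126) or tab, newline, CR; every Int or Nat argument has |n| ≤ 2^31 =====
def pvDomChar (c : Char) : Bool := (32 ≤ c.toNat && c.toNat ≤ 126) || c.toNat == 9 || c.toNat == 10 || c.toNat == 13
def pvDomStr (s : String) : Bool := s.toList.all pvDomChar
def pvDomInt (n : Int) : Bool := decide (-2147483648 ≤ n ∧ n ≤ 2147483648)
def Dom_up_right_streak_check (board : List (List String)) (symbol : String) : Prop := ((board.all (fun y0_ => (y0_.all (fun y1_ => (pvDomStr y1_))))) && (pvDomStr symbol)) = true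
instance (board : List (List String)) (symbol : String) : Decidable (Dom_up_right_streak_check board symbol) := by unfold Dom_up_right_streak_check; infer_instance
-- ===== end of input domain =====

-- B replaces A's `checked`-list bookkeeping (an O(|checked|) membership scan per cell)
-- by a stateless constant-time predecessor test identifying the first cell of each
-- up-right run; objective: simpler (no speedup measured on the generated inputs).

-- ===== PORT A =====

-- board[c][r] via total defaults; inside Pre_ every access Python makes is in range.
def pvCellA (board : List (List String)) (c r : Int) : String :=
  PySem.List.pyGetD (PySem.List.pyGetD board c []) r ""

-- the `while` walk of A: returns the final i and the grown `checked` list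
def pvWalkA (board : List (List String)) (symbol : String) (col row : Int)
    (i : Int) (checked : List (Int × Int)) : Int × List (Int × Int) :=
  if h : col + i < 7 ∧ 0 ≤ row - i ∧ pvCellA board (col + i) (row - i) = symbol then
    pvWalkA board symbol col row (i + 1) (checked ++ [(col + i, row - i)])
  else (i, checked)
termination_by (7 - (col + i)).toNat
decreasing_by omega

-- body of A's inner `for row` loop (state = (up_right_streak, checked))
def pvBodyA (board : List (List String)) (symbol : String) (col : Int)
    (st : Int × List (Int × Int)) (row : Int) : Int × List (Int × Int) :=
  if (col, row) ∈ st.2 then st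
  else if pvCellA board col row = symbol then
    let w := pvWalkA board symbol col row 1 st.2
    if col + w.1 < 7 ∧ 0 ≤ row - w.1 ∧ pvCellA board (col + w.1) (row - w.1) = " " then
      (st.1 + (w.1 - 1), w.2)
    else (st.1, w.2)
  else st

def up_right_streak_check (board : List (List String)) (symbol : String) : Int :=
  ((PySem.List.pyRange 0 ((board.length : Int) - 3) 1).foldl (fun st col =>
      (PySem.List.pyRange (((board.headD []).length : Int) - 1) 2 (-1)).foldl
        (pvBodyA board symbol col) st)
    (0, ([] : List (Int × Int)))).1

-- ===== PORT B =====

def pvCellB (board : List (List String)) (c r : Int) : String :=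
  PySem.List.pyGetD (PySem.List.pyGetD board c []) r ""

-- B's `while` walk: pure, no checked list
def pvWalkB (board : List (List String)) (symbol : String) (c r i : Int) : Int :=
  if h : c + i < 7 ∧ 0 ≤ r - i ∧ pvCellB board (c + i) (r - i) = symbol then
    pvWalkB board symbol c r (i + 1)
  else i
termination_by (7 - (c + i)).toNat
decreasing_by omega

def up_right_streak_check_alt (board : List (List String)) (symbol : String) : Int :=
  if board = [] then 0
  else
    let rows : Int := ((board.headD []).length : Int)
    (PySem.List.pyRange 0 ((board.length : Int) - 3) 1).foldl (fun total c =>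
      (PySem.List.pyRange 3 rows 1).foldl (fun total r =>
        if pvCellB board c r ≠ symbol then total
        else if 1 ≤ c ∧ r + 1 < rows ∧ pvCellB board (c - 1) (r + 1) = symbol then total
        else
          let i := pvWalkB board symbol c r 1
          if c + i < 7 ∧ 0 ≤ r - i ∧ pvCellB board (c + i) (r - i) = " " then total + (i - 1)
          else total) total) 0

-- ===== PRECONDITION & SPEC =====

-- cell accessor used only by Pre_ (same total default read, kept separate from the ports)
def pvCellP (board : List (List String)) (c r : Int) : String :=
  PySem.List.pyGetD (PySem.List.pyGetD board c []) r ""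

-- Pre_ excludes exactly the inputs on which the Python A raises IndexError: boards whose
-- touched columns (the first max(len-3,7)) are shorter than board[0] — A raises whenever its
-- scan or a walk reaches such a short column — and boards of 4..6 columns containing a full
-- up-right `symbol` run from a scanned start cell through the last column with the diagonal
-- continuing on-board, where A's hardcoded `7` makes it read board[len(board)] and raise.
-- (The rectangularity clause also drops the rare boards whose short columns are never
-- reached because they hold no symbols; A returns 0 there, as does B — see the cite.)
def Pre_up_right_streak_check (board : List (List String)) (symbol : String) : Prop :=
  (board.length ≤ 3 ∨ (board.headD []).length ≤ 3) ∨
  ((∀ col ∈ board.take (max (board.length - 3) 7), (board.headD []).length ≤ col.length) ∧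
   ¬ (4 ≤ board.length ∧ board.length ≤ 6 ∧
      ∃ c ∈ PySem.List.pyRange 0 ((board.length : Int) - 3) 1,
        ∃ r ∈ PySem.List.pyRange 3 ((board.headD []).length : Int) 1,
          0 ≤ r - ((board.length : Int) - c) ∧
          ∀ j ∈ PySem.List.pyRange 0 ((board.length : Int) - c) 1,
            pvCellP board (c + j) (r - j) = symbol))

instance (board : List (List String)) (symbol : String) :
    Decidable (Pre_up_right_streak_check board symbol) := by
  unfold Pre_up_right_streak_check; infer_instance

def pvWitness_up_right_streak_check : List (List String) × String :=
  ([[" ", " ", " ", "x", " ", " "], [" ", " ", " ", " ", "x", " "],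
    [" ", " ", " ", " ", " ", "x"], [" ", " ", " ", " ", " ", " "],
    [" ", " ", " ", " ", " ", " "], [" ", " ", " ", " ", " ", " "],
    [" ", " ", " ", " ", " ", " "]], "x")

def Spec_up_right_streak_check (board : List (List String)) (symbol : String) (out : Int) : Prop :=
  out = up_right_streak_check_alt board symbol
instance (board : List (List String)) (symbol : String) (out : Int) :
    Decidable (Spec_up_right_streak_check board symbol out) := by
  unfold Spec_up_right_streak_check; infer_instance

-- ===== CLAIM (what is proved, stated in full; the proofs are below) =====
def Claim_equal_up_right_streak_check : Prop := ∀ (board : List (List String)) (symbol : String), Dom_up_right_streak_check board symbol → Pre_up_right_streak_check board symbol → Spec_up_right_streak_check board symbol (up_right_streak_check board symbol)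

-- ===== LEMMAS AND PROOFS =====
-- (the two ports are in fact equal on ALL inputs — both read cells through the same total
-- default accessor — so Pre_ is not needed by the proof, only by the Python-side claim)

-- abbreviations (proof-side only)
def pvR (board : List (List String)) : Int := ((board.headD []).length : Int)
def pvC (board : List (List String)) : Int := ((board.length : Int))

@[simp] theorem pvCellB_eq (board : List (List String)) (c r : Int) :
    pvCellB board c r = pvCellA board c r := rfl

-- the walk-continuation condition at offset j from (c, r)
def pvCond (board : List (List String)) (symbol : String) (c r j : Int) : Prop :=
  c + j < 7 ∧ 0 ≤ r - j ∧ pvCellA board (c + j) (r - j) = symbol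

-- (c, y) is strictly inside a run: its down-left neighbour is a real symbol cell
def pvInterior (board : List (List String)) (symbol : String) (c y : Int) : Prop :=
  1 ≤ c ∧ y + 1 < pvR board ∧ pvCellA board (c - 1) (y + 1) = symbol

-- (u, v) has been appended to `checked` after A has processed the columns < n
def pvQ (board : List (List String)) (symbol : String) (n u v : Int) : Prop :=
  ∃ a b i : Int, 0 ≤ a ∧ a < n ∧ a ≤ pvC board - 4 ∧ 3 ≤ b ∧ b ≤ pvR board - 1 ∧
    pvCellA board a b = symbol ∧ ¬ pvInterior board symbol a b ∧
    1 ≤ i ∧ i < pvWalkB board symbol a b 1 ∧ u = a + i ∧ v = b - i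

-- `checked` in the middle of column c's row loop, rows > t already processed
def pvQQ (board : List (List String)) (symbol : String) (c t u v : Int) : Prop :=
  pvQ board symbol c u v ∨
  ∃ b i : Int, 2 < b ∧ t < b ∧ b ≤ pvR board - 1 ∧
    pvCellA board c b = symbol ∧ ¬ pvQ board symbol c c b ∧
    1 ≤ i ∧ i < pvWalkB board symbol c b 1 ∧ u = c + i ∧ v = b - i

-- per-cell contribution of B
def pvG (board : List (List String)) (symbol : String) (c r : Int) : Int :=
  if pvCellA board c r ≠ symbol then 0
  else if 1 ≤ c ∧ r + 1 < pvR board ∧ pvCellA board (c - 1) (r + 1) = symbol then 0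
  else
    let i := pvWalkB board symbol c r 1
    if c + i < 7 ∧ 0 ≤ r - i ∧ pvCellA board (c + i) (r - i) = " " then i - 1 else 0

-- per-column contribution of B
def pvS (board : List (List String)) (symbol : String) (c : Int) : Int :=
  ((PySem.List.pyRange 3 (pvR board) 1).map (pvG board symbol c)).sum

theorem pvWalkB_ge (board : List (List String)) (symbol : String) (c r i : Int) :
    i ≤ pvWalkB board symbol c r i := by
  fun_induction pvWalkB with
  | case1 i h ih => omega
  | case2 i h => omega

theorem pvWalkB_lt_iff (board : List (List String)) (symbol : String) (c r : Int) :
    ∀ i j : Int, i ≤ j →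
      (j < pvWalkB board symbol c r i ↔ ∀ t, i ≤ t → t ≤ j → pvCond board symbol c r t) := by
  intro i j
  induction i using pvWalkB.induct board symbol c r with
  | case1 i h ih =>
    intro hij
    rw [pvWalkB, dif_pos h]
    by_cases hj : i + 1 ≤ j
    · rw [ih hj]
      constructor
      · intro hall t h1 h2
        rcases eq_or_lt_of_le h1 with rfl | h1'
        · exact h
        · exact hall t (by omega) h2
      · intro hall t h1 h2; exact hall t (by omega) h2
    · have hji : j = i := by omega
      have hge := pvWalkB_ge board symbol c r (i + 1)
      constructor
      · intro _ t h1 h2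
        have ht : t = i := by omega
        rw [ht]; exact h
      · intro _; omega
  | case2 i h =>
    intro hij
    rw [pvWalkB, dif_neg h]
    constructor
    · omega
    · intro hall
      exact absurd (hall i le_rfl hij) (by simpa [pvCond] using h)

theorem pvWalkB_stop (board : List (List String)) (symbol : String) (c r i : Int)
    (h : ¬ pvCond board symbol c r i) : pvWalkB board symbol c r i = i := by
  rw [pvWalkB, dif_neg (by simpa [pvCond] using h)]

theorem pvWalkA_eq (board : List (List String)) (symbol : String) (col row : Int) :
    ∀ i checked, pvWalkA board symbol col row i checked =
      (pvWalkB board symbol col row i,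
       checked ++ (PySem.List.pyRange i (pvWalkB board symbol col row i) 1).map
         (fun t => (col + t, row - t))) := by
  intro i
  induction i using pvWalkB.induct board symbol col row with
  | case1 i h ih =>
    intro checked
    have h' : col + i < 7 ∧ 0 ≤ row - i ∧ pvCellA board (col + i) (row - i) = symbol := h
    have hWeq : pvWalkB board symbol col row i = pvWalkB board symbol col row (i + 1) := by
      rw [pvWalkB, dif_pos h]
    have hW : i < pvWalkB board symbol col row (i + 1) := by
      have := pvWalkB_ge board symbol col row (i + 1); omega
    rw [pvWalkA, dif_pos h', ih, hWeq]
    conv_rhs => rw [PySem.List.pyRange_one_cons hW]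
    simp
  | case2 i h =>
    intro checked
    have h' : ¬ (col + i < 7 ∧ 0 ≤ row - i ∧ pvCellA board (col + i) (row - i) = symbol) := h
    rw [pvWalkA, dif_neg h', pvWalkB_stop board symbol col row i (by simpa [pvCond] using h)]
    rw [PySem.List.pyRange_one_eq_nil le_rfl]
    simp

theorem pvQ_mono (board : List (List String)) (symbol : String) {n n' u v : Int}
    (h : n ≤ n') (hq : pvQ board symbol n u v) : pvQ board symbol n' u v := by
  obtain ⟨a, b, i, h1, h2, h3⟩ := hq
  exact ⟨a, b, i, h1, by omega, h3⟩

-- downward induction producing the run's first cell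
theorem pvQ_of_interior (board : List (List String)) (symbol : String) :
    ∀ (m : Nat) (c y : Int), c.toNat ≤ m → 0 ≤ c → c ≤ pvC board - 4 → 3 ≤ y →
      y ≤ pvR board - 1 → pvCellA board c y = symbol → pvInterior board symbol c y →
      c ≤ 6 → pvQ board symbol c c y := by
  intro m
  induction m with
  | zero =>
    intro c y hm hc0 _ _ _ _ hint _
    obtain ⟨hc1, _, _⟩ := hint
    omega
  | succ m ih =>
    intro c y hm hc0 hc4 hy3 hyR hsym hint hc6
    obtain ⟨hc1, hyR2, hpred⟩ := hint
    by_cases hint' : pvInterior board symbol (c - 1) (y + 1)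
    · obtain ⟨a, b, i, ha0, han, haC, hb3, hbR, hsyma, hninta, hi1, hiL, hu, hv⟩ :=
        ih (c - 1) (y + 1) (by omega) (by omega) (by omega) (by omega) (by omega) hpred hint'
          (by omega)
    -- extend the found walk by one step onto (c, y)
      refine ⟨a, b, i + 1, ha0, by omega, haC, hb3, hbR, hsyma, hninta, by omega, ?_, by omega,
        by omega⟩
      have hall := (pvWalkB_lt_iff board symbol a b 1 i hi1).mp hiL
      refine (pvWalkB_lt_iff board symbol a b 1 (i + 1) (by omega)).mpr ?_
      intro t ht1 ht2
      by_cases htop : t = i + 1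
      · subst htop
        refine ⟨by omega, by omega, ?_⟩
        rw [show a + (i + 1) = c from by omega, show b - (i + 1) = y from by omega]
        exact hsym
      · exact hall t ht1 (by omega)
    · -- (c-1, y+1) is the run's first cell
      refine ⟨c - 1, y + 1, 1, by omega, by omega, by omega, by omega, by omega, hpred, hint',
        le_rfl, ?_, by omega, by omega⟩
      refine (pvWalkB_lt_iff board symbol (c - 1) (y + 1) 1 1 le_rfl).mpr ?_
      intro t ht1 ht2
      have ht : t = 1 := by omega
      subst ht
      refine ⟨by omega, by omega, ?_⟩
      rw [show c - 1 + 1 = c from by omega, show y + 1 - 1 = y from by omega]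
      exact hsym

-- EQUIV: a scanned cell is in `checked` iff it is a run-interior symbol cell with col ≤ 6
theorem pvQ_self_iff (board : List (List String)) (symbol : String) (c y : Int)
    (hc0 : 0 ≤ c) (hc4 : c ≤ pvC board - 4) (hy3 : 3 ≤ y) (hyR : y ≤ pvR board - 1) :
    pvQ board symbol c c y ↔
      (pvCellA board c y = symbol ∧ pvInterior board symbol c y ∧ c ≤ 6) := by
  constructor
  · rintro ⟨a, b, i, ha0, han, haC, hb3, hbR, hsym, hnint, hi1, hiL, hu, hv⟩
    subst hu; subst hv
    have hall := (pvWalkB_lt_iff board symbol a b 1 i hi1).mp hiL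
    obtain ⟨hc7, hr0, hcell⟩ := hall i hi1 le_rfl
    refine ⟨hcell, ⟨by omega, by omega, ?_⟩, by omega⟩
    rcases eq_or_lt_of_le hi1 with h1 | h1
    · rw [show a + i - 1 = a from by omega, show b - i + 1 = b from by omega]
      exact hsym
    · obtain ⟨_, _, hc⟩ := hall (i - 1) (by omega) (by omega)
      rw [show a + i - 1 = a + (i - 1) from by ring, show b - i + 1 = b - (i - 1) from by ring]
      exact hc
  · rintro ⟨hsym, hint, hc6⟩
    exact pvQ_of_interior board symbol c.toNat c y le_rfl hc0 hc4 hy3 hyR hsym hint hc6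

-- KEY: after finishing column c, `checked` is described by pvQ at c+1
theorem pvQQ2_iff (board : List (List String)) (symbol : String) (c : Int)
    (hc0 : 0 ≤ c) (hc4 : c ≤ pvC board - 4) (u v : Int) :
    pvQQ board symbol c 2 u v ↔ pvQ board symbol (c + 1) u v := by
  constructor
  · rintro (hq | ⟨b, i, hb2, _, hbR, hsym, hnq, hi1, hiL, hu, hv⟩)
    · exact pvQ_mono board symbol (by omega) hq
    · by_cases hc6 : c ≤ 6
      · have hiff := pvQ_self_iff board symbol c b hc0 hc4 (by omega) hbR
        have hnint : ¬ pvInterior board symbol c b := fun hint =>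
          hnq (hiff.mpr ⟨hsym, hint, hc6⟩)
        exact ⟨c, b, i, hc0, by omega, hc4, by omega, hbR, hsym, hnint, hi1, hiL, hu, hv⟩
      · have hL : pvWalkB board symbol c b 1 = 1 :=
          pvWalkB_stop _ _ _ _ _ (by unfold pvCond; omega)
        omega
  · rintro ⟨a, b, i, ha0, han, haC, hb3, hbR, hsym, hnint, hi1, hiL, hu, hv⟩
    by_cases hac : a < c
    · exact Or.inl ⟨a, b, i, ha0, hac, haC, hb3, hbR, hsym, hnint, hi1, hiL, hu, hv⟩
    · obtain rfl : a = c := by omega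
      refine Or.inr ⟨b, i, by omega, by omega, hbR, hsym, ?_, hi1, hiL, hu, hv⟩
      intro hq
      obtain ⟨_, hint, _⟩ := (pvQ_self_iff board symbol a b hc0 hc4 hb3 hbR).mp hq
      exact hnint hint

-- shifting the processed-rows boundary by one row
theorem pvQQ_pred (board : List (List String)) (symbol : String) (c y : Int) (hy3 : 3 ≤ y)
    (u v : Int) :
    pvQQ board symbol c (y - 1) u v ↔
      (pvQQ board symbol c y u v ∨
        (y ≤ pvR board - 1 ∧ pvCellA board c y = symbol ∧ ¬ pvQ board symbol c c y ∧
          ∃ i, 1 ≤ i ∧ i < pvWalkB board symbol c y 1 ∧ u = c + i ∧ v = y - i)) := by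
  constructor
  · rintro (h | ⟨b, i, hb2, hby, hbR, hs, hnq, hi1, hiL, hu, hv⟩)
    · exact Or.inl (Or.inl h)
    · by_cases hbe : b = y
      · subst hbe
        exact Or.inr ⟨hbR, hs, hnq, i, hi1, hiL, hu, hv⟩
      · exact Or.inl (Or.inr ⟨b, i, hb2, by omega, hbR, hs, hnq, hi1, hiL, hu, hv⟩)
  · rintro ((h | ⟨b, i, hb2, hby, hbR, hs, hnq, hi1, hiL, hu, hv⟩) |
      ⟨hyR, hs, hnq, i, hi1, hiL, hu, hv⟩)
    · exact Or.inl h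
    · exact Or.inr ⟨b, i, hb2, by omega, hbR, hs, hnq, hi1, hiL, hu, hv⟩
    · exact Or.inr ⟨y, i, by omega, by omega, hyR, hs, hnq, hi1, hiL, hu, hv⟩

-- below the last scanned row the boundary no longer matters
theorem pvQQ_low (board : List (List String)) (symbol : String) (c t : Int) (ht : t ≤ 2)
    (u v : Int) : pvQQ board symbol c t u v ↔ pvQQ board symbol c 2 u v := by
  constructor
  · rintro (h | ⟨b, i, hb2, hby, hrest⟩)
    · exact Or.inl h
    · exact Or.inr ⟨b, i, hb2, hb2, hrest⟩
  · rintro (h | ⟨b, i, hb2, hby, hrest⟩)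
    · exact Or.inl h
    · exact Or.inr ⟨b, i, hb2, by omega, hrest⟩

-- a cell of its own column is never in `checked` while that column is scanned
theorem pvQQ_self (board : List (List String)) (symbol : String) (c y t : Int) :
    pvQQ board symbol c t c y ↔ pvQ board symbol c c y := by
  constructor
  · rintro (h | ⟨b, i, _, _, _, _, _, hi1, _, hu, _⟩)
    · exact h
    · omega
  · exact Or.inl

-- one row step of A's inner loop
theorem pvStep (board : List (List String)) (symbol : String) (c y : Int)
    (hc0 : 0 ≤ c) (hc4 : c ≤ pvC board - 4) (hy3 : 3 ≤ y) (hyR : y ≤ pvR board - 1)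
    (s : Int) (chk : List (Int × Int))
    (H : ∀ u v, (u, v) ∈ chk ↔ pvQQ board symbol c y u v) :
    pvBodyA board symbol c (s, chk) y =
      (s + pvG board symbol c y, (pvBodyA board symbol c (s, chk) y).2) ∧
    (∀ u v, (u, v) ∈ (pvBodyA board symbol c (s, chk) y).2 ↔
      pvQQ board symbol c (y - 1) u v) := by
  have hmemiff : ((c, y) ∈ chk) ↔ pvQ board symbol c c y := by
    rw [H c y, pvQQ_self]
  by_cases hmem : (c, y) ∈ chk
  · have hQ : pvQ board symbol c c y := hmemiff.mp hmem
    obtain ⟨hsym, hint, _⟩ := (pvQ_self_iff board symbol c y hc0 hc4 hy3 hyR).mp hQ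
    have hbody : pvBodyA board symbol c (s, chk) y = (s, chk) := by
      simp [pvBodyA, hmem]
    rw [hbody]
    constructor
    · obtain ⟨hi1, hi2, hi3⟩ := hint
      have hg : pvG board symbol c y = 0 := by simp [pvG, hsym, hi1, hi2, hi3]
      rw [hg]; simp
    · intro u v
      rw [H u v, pvQQ_pred board symbol c y hy3]
      constructor
      · exact Or.inl
      · rintro (h | ⟨_, _, hnq, _⟩)
        · exact h
        · exact absurd hQ hnq
  · have hnQ : ¬ pvQ board symbol c c y := fun h => hmem (hmemiff.mpr h)
    by_cases hsym : pvCellA board c y = symbol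
    · have hL1 : 1 ≤ pvWalkB board symbol c y 1 := pvWalkB_ge board symbol c y 1
      have hbody : pvBodyA board symbol c (s, chk) y =
          (s + pvG board symbol c y,
            chk ++ (PySem.List.pyRange 1 (pvWalkB board symbol c y 1) 1).map
              (fun t => (c + t, y - t))) := by
        simp only [pvBodyA, if_neg hmem, if_pos hsym, pvWalkA_eq]
        by_cases hint : pvInterior board symbol c y
        · have hc7 : 7 ≤ c := by
            by_contra hc6
            exact hnQ ((pvQ_self_iff board symbol c y hc0 hc4 hy3 hyR).mpr
              ⟨hsym, hint, by omega⟩)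
          obtain ⟨hi1, hi2, hi3⟩ := hint
          have hg : pvG board symbol c y = 0 := by simp [pvG, hsym, hi1, hi2, hi3]
          rw [hg, if_neg (by omega)]
          simp
        · have hg : pvG board symbol c y =
              (if c + pvWalkB board symbol c y 1 < 7 ∧ 0 ≤ y - pvWalkB board symbol c y 1 ∧
                  pvCellA board (c + pvWalkB board symbol c y 1)
                    (y - pvWalkB board symbol c y 1) = " " then
                pvWalkB board symbol c y 1 - 1 else 0) := by
            have hintc : ¬ (1 ≤ c ∧ y + 1 < pvR board ∧
                pvCellA board (c - 1) (y + 1) = symbol) := by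
              simpa [pvInterior] using hint
            simp [pvG, hsym, hintc]
          rw [hg]
          split
          · rfl
          · simp
      rw [hbody]
      refine ⟨rfl, ?_⟩
      intro u v
      rw [List.mem_append, H u v, pvQQ_pred board symbol c y hy3]
      constructor
      · rintro (h | hseg)
        · exact Or.inl h
        · obtain ⟨t, ht, he⟩ := List.mem_map.mp hseg
          obtain ⟨ht1, htL⟩ := PySem.List.mem_pyRange_one.mp ht
          refine Or.inr ⟨hyR, hsym, hnQ, t, ht1, htL, ?_, ?_⟩
          · exact (congrArg Prod.fst he).symm
          · exact (congrArg Prod.snd he).symm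
      · rintro (h | ⟨_, _, _, i, hi1, hiL, hu, hv⟩)
        · exact Or.inl h
        · refine Or.inr (List.mem_map.mpr ⟨i, PySem.List.mem_pyRange_one.mpr ⟨hi1, hiL⟩, ?_⟩)
          simp [hu, hv]
    · have hbody : pvBodyA board symbol c (s, chk) y = (s, chk) := by
        simp [pvBodyA, hmem, hsym]
      rw [hbody]
      constructor
      · have hg : pvG board symbol c y = 0 := by simp [pvG, hsym]
        rw [hg]; simp
      · intro u v
        rw [H u v, pvQQ_pred board symbol c y hy3]
        constructor
        · exact Or.inl
        · rintro (h | ⟨_, hs, _⟩)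
          · exact h
          · exact absurd hs hsym

-- A's whole inner row loop
theorem pvInner (board : List (List String)) (symbol : String) (c : Int)
    (hc0 : 0 ≤ c) (hc4 : c ≤ pvC board - 4) :
    ∀ (ytop : Int), ytop ≤ pvR board - 1 → ∀ (s : Int) (chk : List (Int × Int)),
      (∀ u v, (u, v) ∈ chk ↔ pvQQ board symbol c ytop u v) →
      ((PySem.List.pyRange ytop 2 (-1)).foldl (pvBodyA board symbol c) (s, chk)).1 =
          s + ((PySem.List.pyRange 3 (ytop + 1) 1).map (pvG board symbol c)).sum ∧
      (∀ u v, (u, v) ∈ ((PySem.List.pyRange ytop 2 (-1)).foldl (pvBodyA board symbol c) (s, chk)).2 ↔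
        pvQQ board symbol c 2 u v) := by
  suffices Hk : ∀ (k : Nat) (ytop : Int), (ytop - 2).toNat = k → ytop ≤ pvR board - 1 →
      ∀ (s : Int) (chk : List (Int × Int)),
      (∀ u v, (u, v) ∈ chk ↔ pvQQ board symbol c ytop u v) →
      ((PySem.List.pyRange ytop 2 (-1)).foldl (pvBodyA board symbol c) (s, chk)).1 =
          s + ((PySem.List.pyRange 3 (ytop + 1) 1).map (pvG board symbol c)).sum ∧
      (∀ u v, (u, v) ∈ ((PySem.List.pyRange ytop 2 (-1)).foldl (pvBodyA board symbol c) (s, chk)).2 ↔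
        pvQQ board symbol c 2 u v) by
    intro ytop hle s chk H
    exact Hk _ ytop rfl hle s chk H
  intro k
  induction k with
  | zero =>
    intro ytop hk hle s chk H
    have hy2 : ytop ≤ 2 := by omega
    rw [PySem.List.pyRange_neg_one_eq_nil hy2, PySem.List.pyRange_one_eq_nil (by omega)]
    refine ⟨by simp, ?_⟩
    intro u v
    simpa using (H u v).trans (pvQQ_low board symbol c ytop hy2 u v)
  | succ k ih =>
    intro ytop hk hle s chk H
    have hy3 : 3 ≤ ytop := by omega
    rw [PySem.List.pyRange_neg_one_cons (by omega)]
    simp only [List.foldl_cons]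
    obtain ⟨h1, h2⟩ := pvStep board symbol c ytop hc0 hc4 hy3 hle s chk H
    rcases hp : pvBodyA board symbol c (s, chk) ytop with ⟨s1, c1⟩
    rw [hp] at h1 h2
    have hs1 : s1 = s + pvG board symbol c ytop := congrArg Prod.fst h1
    obtain ⟨ih1, ih2⟩ := ih (ytop - 1) (by omega) (by omega) s1 c1 (by
      intro u v; simpa using h2 u v)
    refine ⟨?_, ih2⟩
    have hsplit : (List.map (pvG board symbol c) (PySem.List.pyRange 3 (ytop + 1) 1)).sum =
        (List.map (pvG board symbol c) (PySem.List.pyRange 3 ytop 1)).sum +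
          pvG board symbol c ytop := by
      rw [PySem.List.pyRange_one_succ_right (by omega : (3:Int) ≤ ytop)]
      simp
    rw [ih1, hs1, show ytop - 1 + 1 = ytop from by ring, hsplit]
    ring

-- A's outer column loop
theorem pvOuter (board : List (List String)) (symbol : String) :
    ∀ (k : Nat) (c : Int), (pvC board - 3 - c).toNat = k → 0 ≤ c →
      ∀ (s : Int) (chk : List (Int × Int)),
        (∀ u v, (u, v) ∈ chk ↔ pvQ board symbol c u v) →
        ((PySem.List.pyRange c (pvC board - 3) 1).foldl (fun st col =>
            (PySem.List.pyRange (pvR board - 1) 2 (-1)).foldl (pvBodyA board symbol col) st)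
          (s, chk)).1 =
          s + ((PySem.List.pyRange c (pvC board - 3) 1).map (pvS board symbol)).sum := by
  intro k
  induction k with
  | zero =>
    intro c hk hc0 s chk H
    rw [PySem.List.pyRange_one_eq_nil (by omega)]
    simp
  | succ k ih =>
    intro c hk hc0 s chk H
    have hcC : c < pvC board - 3 := by omega
    rw [PySem.List.pyRange_one_cons (by omega)]
    simp only [List.foldl_cons, List.map_cons, List.sum_cons]
    have HQQ : ∀ u v, (u, v) ∈ chk ↔ pvQQ board symbol c (pvR board - 1) u v := by
      intro u v
      rw [H u v]
      constructor
      · exact Or.inl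
      · rintro (h | ⟨b, i, _, hby, hbR, _⟩)
        · exact h
        · omega
    obtain ⟨h1, h2⟩ := pvInner board symbol c hc0 (by omega) (pvR board - 1) le_rfl s chk HQQ
    rcases hp : (PySem.List.pyRange (pvR board - 1) 2 (-1)).foldl (pvBodyA board symbol c)
      (s, chk) with ⟨s1, c1⟩
    rw [hp] at h1 h2
    have h1' : s1 = s + (List.map (pvG board symbol c)
        (PySem.List.pyRange 3 (pvR board - 1 + 1) 1)).sum := by simpa using h1
    have hs1 : s1 = s + pvS board symbol c := by
      rw [h1', pvS, show pvR board - 1 + 1 = pvR board from by ring]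
    have H2 : ∀ u v, (u, v) ∈ c1 ↔ pvQ board symbol (c + 1) u v := by
      intro u v
      rw [h2 u v, pvQQ2_iff board symbol c hc0 (by omega)]
    rw [ih (c + 1) (by omega) (by omega) s1 c1 H2, hs1]
    ring

theorem pvA_eq_sum (board : List (List String)) (symbol : String) :
    up_right_streak_check board symbol =
      ((PySem.List.pyRange 0 (pvC board - 3) 1).map (pvS board symbol)).sum := by
  have H0 : ∀ u v : Int, (u, v) ∈ ([] : List (Int × Int)) ↔ pvQ board symbol 0 u v := by
    intro u v
    simp only [List.not_mem_nil, false_iff]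
    rintro ⟨a, b, i, ha0, han, _⟩
    omega
  have := pvOuter board symbol (pvC board - 3 - 0).toNat 0 rfl le_rfl 0 [] H0
  rw [zero_add] at this
  simpa [up_right_streak_check, pvC, pvR] using this

theorem pvB_eq_sum (board : List (List String)) (symbol : String) :
    up_right_streak_check_alt board symbol =
      ((PySem.List.pyRange 0 (pvC board - 3) 1).map (pvS board symbol)).sum := by
  have hbody : ∀ (cc total r : Int),
      (if pvCellB board cc r ≠ symbol then total
       else if 1 ≤ cc ∧ r + 1 < ((board.headD []).length : Int) ∧
           pvCellB board (cc - 1) (r + 1) = symbol then total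
       else if cc + pvWalkB board symbol cc r 1 < 7 ∧ 0 ≤ r - pvWalkB board symbol cc r 1 ∧
           pvCellB board (cc + pvWalkB board symbol cc r 1) (r - pvWalkB board symbol cc r 1) = " "
         then total + (pvWalkB board symbol cc r 1 - 1) else total) =
      total + pvG board symbol cc r := by
    intro cc total r
    simp only [pvG, pvR, pvCellB_eq]
    split_ifs <;> omega
  by_cases hb : board = []
  · subst hb
    rw [up_right_streak_check_alt, if_pos rfl,
      PySem.List.pyRange_one_eq_nil (by norm_num [pvC])]
    simp
  · rw [up_right_streak_check_alt, if_neg hb]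
    show (PySem.List.pyRange 0 ((board.length : Int) - 3) 1).foldl (fun total c =>
        (PySem.List.pyRange 3 ((board.headD []).length : Int) 1).foldl (fun total r =>
          if pvCellB board c r ≠ symbol then total
          else if 1 ≤ c ∧ r + 1 < ((board.headD []).length : Int) ∧
              pvCellB board (c - 1) (r + 1) = symbol then total
          else if c + pvWalkB board symbol c r 1 < 7 ∧ 0 ≤ r - pvWalkB board symbol c r 1 ∧
              pvCellB board (c + pvWalkB board symbol c r 1)
                (r - pvWalkB board symbol c r 1) = " "
            then total + (pvWalkB board symbol c r 1 - 1) else total) total) 0 =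
      ((PySem.List.pyRange 0 (pvC board - 3) 1).map (pvS board symbol)).sum
    refine (PySem.List.foldl_congr_mem _ _
      (fun (total c : Int) => total + pvS board symbol c) 0 ?_).trans ?_
    · intro acc cc _
      refine (PySem.List.foldl_congr_mem _ _
        (fun (t r : Int) => t + pvG board symbol cc r) acc
        (fun acc2 x _ => hbody cc acc2 x)).trans ?_
      rw [PySem.List.foldl_add]
      simp [pvS, pvR]
    · rw [PySem.List.foldl_add, zero_add, pvC]

-- ===== VERDICT (by name: the statement is the Claim_ definition above) =====
theorem up_right_streak_check_spec : Claim_equal_up_right_streak_check := by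
  intro board symbol _ _
  unfold Spec_up_right_streak_check
  rw [pvA_eq_sum, pvB_eq_sum]
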